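-- pv_equiv track=rewrite | github.com/KLIEBHAN/pulsescribe | utils/history.py | _select_recent_lines_within_bytes
-- ===== SOURCE A (Python) =====
-- def _select_recent_lines_within_bytes(
--     lines: list[str], max_size_bytes: int
-- ) -> list[str]:
--     """Keep the newest JSONL lines that still fit inside the size budget.
--
--     The newest entry is always preserved, even if a single line already exceeds
--     the configured limit. This avoids corrupt partial entries while still
--     shrinking multi-entry histories as much as possible.
--     """
--     if not lines:
--         return []
--
--     kept_reversed: list[str] = []
--     total_bytes = 0
--
--     for line in reversed(lines):
--         line_size = len(line.encode("utf-8")) + 1  # JSONL newline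
--         if kept_reversed and total_bytes + line_size > max_size_bytes:
--             break
--         kept_reversed.append(line)
--         total_bytes += line_size
--
--     return list(reversed(kept_reversed))
-- ===== SOURCE B (Python) =====
-- def _select_recent_lines_within_bytes(lines, max_size_bytes):
--     """Suffix-sum + binary-search re-implementation: find the smallest start
--     index whose suffix fits the byte budget, clamp so the newest line is
--     always kept, and return that suffix as a slice."""
--     if not lines:
--         return []
--     n = len(lines)
--     suffix = [0] * (n + 1)
--     for i in range(n - 1, -1, -1):
--         suffix[i] = suffix[i + 1] + len(lines[i].encode("utf-8")) + 1
--     # suffix is strictly decreasing; find smallest i with suffix[i] <= budget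
--     lo, hi = 0, n
--     while lo < hi:
--         mid = (lo + hi) // 2
--         if suffix[mid] <= max_size_bytes:
--             hi = mid
--         else:
--             lo = mid + 1
--     return lines[min(lo, n - 1):]
-- ===== Notes on version B (the rewrite author's own statement) =====
-- stated objective: alternative
-- what changed: Replaces the reversed greedy accumulation loop (append while the budget holds, then re-reverse) by precomputed suffix byte sums plus a binary search for the smallest start index whose suffix fits, clamped so the newest line survives, returning a direct slice.
import Mathlib
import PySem

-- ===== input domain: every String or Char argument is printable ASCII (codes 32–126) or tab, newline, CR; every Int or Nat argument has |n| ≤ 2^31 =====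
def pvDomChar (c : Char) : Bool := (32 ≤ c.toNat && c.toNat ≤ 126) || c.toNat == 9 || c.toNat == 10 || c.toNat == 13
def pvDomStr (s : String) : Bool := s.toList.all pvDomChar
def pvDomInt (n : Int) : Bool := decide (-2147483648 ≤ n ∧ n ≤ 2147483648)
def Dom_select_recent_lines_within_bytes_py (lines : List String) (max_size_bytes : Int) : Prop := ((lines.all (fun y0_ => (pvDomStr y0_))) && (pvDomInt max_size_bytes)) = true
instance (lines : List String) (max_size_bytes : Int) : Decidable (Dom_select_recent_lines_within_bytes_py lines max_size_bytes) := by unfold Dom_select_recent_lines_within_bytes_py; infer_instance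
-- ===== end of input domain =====

-- B replaces A's reversed greedy accumulation by suffix byte sums + a binary search for the
-- smallest fitting start index (alternative decomposition, same asymptotic cost).

-- ===== PORT A =====
-- exact on Dom: every admitted char is ASCII (1 UTF-8 byte), so len(line.encode('utf-8')) = PySem.Str.len line
def pvASize (line : String) : Int := PySem.Str.len line + 1

def pvALoop (m : Int) : List String → Int → List String → List String
  | [], _, kept => kept
  | line :: rest, total, kept =>
    if kept ≠ [] ∧ total + pvASize line > m then kept
    else pvALoop m rest (total + pvASize line) (kept ++ [line])

def select_recent_lines_within_bytes_py (lines : List String) (max_size_bytes : Int) : List String :=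
  if lines = [] then []
  else (pvALoop max_size_bytes lines.reverse 0 []).reverse

-- ===== PORT B =====
-- suffix[i] = total bytes of lines[i:], built right-to-left as in Source B
def pvBSuffix : List String → List Int
  | [] => [0]
  | line :: rest =>
    let s := pvBSuffix rest
    (s.headD 0 + (PySem.Str.len line + 1)) :: s

def pvBSearch (suffix : List Int) (m : Int) (lo hi : Nat) : Nat :=
  if lo < hi then
    if suffix.getD ((lo + hi) / 2) 0 ≤ m then pvBSearch suffix m lo ((lo + hi) / 2)
    else pvBSearch suffix m ((lo + hi) / 2 + 1) hi
  else lo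
termination_by hi - lo
decreasing_by all_goals omega

def select_recent_lines_within_bytes_py_alt (lines : List String) (max_size_bytes : Int) : List String :=
  if lines = [] then []
  else
    let n := lines.length
    let lo := pvBSearch (pvBSuffix lines) max_size_bytes 0 n
    lines.drop (min lo (n - 1))

-- ===== PRECONDITION & SPEC =====
def Spec_select_recent_lines_within_bytes_py (lines : List String) (max_size_bytes : Int) (out : List String) : Prop := out = select_recent_lines_within_bytes_py_alt lines max_size_bytes
instance (lines : List String) (max_size_bytes : Int) (out : List String) : Decidable (Spec_select_recent_lines_within_bytes_py lines max_size_bytes out) := by unfold Spec_select_recent_lines_within_bytes_py; infer_instance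

-- ===== CLAIM (what is proved, stated in full; the proofs are below) =====
def Claim_equal_select_recent_lines_within_bytes_py : Prop := ∀ (lines : List String) (max_size_bytes : Int), Dom_select_recent_lines_within_bytes_py lines max_size_bytes → Spec_select_recent_lines_within_bytes_py lines max_size_bytes (select_recent_lines_within_bytes_py lines max_size_bytes)

-- ===== LEMMAS AND PROOFS =====

-- total byte size of a list of lines
def pvS : List String → Int
  | [] => 0
  | l :: t => pvASize l + pvS t

theorem pvASize_pos (s : String) : 1 ≤ pvASize s := by
  simp [pvASize, PySem.Str.len_eq]

theorem pvS_nonneg (xs : List String) : 0 ≤ pvS xs := by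
  induction xs with
  | nil => simp [pvS]
  | cons l t ih => have := pvASize_pos l; simp [pvS]; linarith

theorem pvS_append (xs ys : List String) : pvS (xs ++ ys) = pvS xs + pvS ys := by
  induction xs with
  | nil => simp [pvS]
  | cons l t ih => simp [pvS, ih]; ring

theorem pvS_reverse (xs : List String) : pvS xs.reverse = pvS xs := by
  induction xs with
  | nil => rfl
  | cons l t ih => simp [pvS, pvS_append, ih]; ring

-- the loop after the first (unconditional) element: a budget-bounded takeWhile
def pvTakeW (m : Int) : List String → Int → List String
  | [], _ => []
  | l :: rest, total =>
    if total + pvASize l > m then []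
    else l :: pvTakeW m rest (total + pvASize l)

theorem pvALoop_take (m : Int) : ∀ (r : List String) (total : Int) (kept : List String), kept ≠ [] →
    pvALoop m r total kept = kept ++ pvTakeW m r total := by
  intro r
  induction r with
  | nil => intro total kept _; simp [pvALoop, pvTakeW]
  | cons l rest ih =>
    intro total kept hk
    by_cases hgt : total + pvASize l > m
    · simp [pvALoop, pvTakeW, hk, hgt]
    · simp [pvALoop, pvTakeW, hk, hgt, ih (total + pvASize l) (kept ++ [l]) (by simp)]

theorem pvTakeW_gt (m : Int) (ys : List String) (total : Int) (h : m < total) :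
    pvTakeW m ys total = [] := by
  cases ys with
  | nil => rfl
  | cons y t =>
    have := pvASize_pos y
    simp [pvTakeW]
    linarith

theorem pvTakeW_all (m : Int) : ∀ (xs : List String) (total : Int), total + pvS xs ≤ m →
    pvTakeW m xs total = xs := by
  intro xs
  induction xs with
  | nil => intro total _; rfl
  | cons x t ih =>
    intro total h
    have h0 := pvS_nonneg t
    have hx : ¬ (total + pvASize x > m) := by simp [pvS] at h; linarith
    simp [pvTakeW, hx]
    exact ih _ (by simp [pvS] at h; linarith)

theorem pvTakeW_append (m : Int) : ∀ (xs ys : List String) (total : Int),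
    pvTakeW m (xs ++ ys) total =
      pvTakeW m xs total ++ (if total + pvS xs ≤ m then pvTakeW m ys (total + pvS xs) else []) := by
  intro xs
  induction xs with
  | nil =>
    intro ys total
    simp only [List.nil_append, pvS, add_zero]
    by_cases h : total ≤ m
    · simp [pvTakeW, h]
    · rw [if_neg h, pvTakeW_gt m ys total (by linarith)]
      simp [pvTakeW]
  | cons x t ih =>
    intro ys total
    by_cases h1 : total + pvASize x > m
    · have h2 : ¬ (total + pvS (x :: t) ≤ m) := by
        have := pvS_nonneg t; simp [pvS]; linarith
      simp [pvTakeW, h1, h2]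
    · have hr : total + pvS (x :: t) = total + pvASize x + pvS t := by simp [pvS]; ring
      simp [pvTakeW, h1, ih ys (total + pvASize x), hr]

-- reference recursion: keep everything if it fits, otherwise drop the oldest line
def pvRef (m : Int) : List String → List String
  | [] => []
  | [l] => [l]
  | l :: t => if pvS (l :: t) ≤ m then l :: t else pvRef m t

theorem pvRef_all (m : Int) (t : List String) (h0 : t ≠ []) (h : pvS t ≤ m) : pvRef m t = t := by
  match t with
  | [l] => rfl
  | l :: a :: b => simp [pvRef, h]

theorem pvLoop_head (m : Int) (c : String) (cs : List String) :
    pvALoop m (c :: cs) 0 [] = c :: pvTakeW m cs (pvASize c) := by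
  have h : pvALoop m (c :: cs) 0 [] = pvALoop m cs (0 + pvASize c) [c] := by
    simp [pvALoop]
  rw [h, pvALoop_take m cs (0 + pvASize c) [c] (by simp)]
  simp

theorem A_eq_ref (m : Int) : ∀ lines : List String,
    select_recent_lines_within_bytes_py lines m = pvRef m lines := by
  intro lines
  induction lines with
  | nil => rfl
  | cons l t ih =>
    cases t with
    | nil =>
      simp [select_recent_lines_within_bytes_py, pvLoop_head, pvTakeW, pvRef]
    | cons a b =>
      cases hr : (a :: b : List String).reverse with
      | nil => simp at hr
      | cons c cs =>
        have hrev : (l :: a :: b : List String).reverse = c :: (cs ++ [l]) := by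
          rw [List.reverse_cons, hr]; simp
        have hS : pvASize c + pvS cs = pvS (a :: b) := by
          have h1 : pvS (c :: cs) = pvS ((a :: b : List String).reverse) := by rw [hr]
          rw [pvS_reverse] at h1
          simpa [pvS] using h1
        have hAfull : select_recent_lines_within_bytes_py (l :: a :: b) m
            = (c :: pvTakeW m (cs ++ [l]) (pvASize c)).reverse := by
          simp only [select_recent_lines_within_bytes_py]
          rw [if_neg (by simp), hrev, pvLoop_head]
        have hAt : select_recent_lines_within_bytes_py (a :: b) m
            = (c :: pvTakeW m cs (pvASize c)).reverse := by
          simp only [select_recent_lines_within_bytes_py]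
          rw [if_neg (by simp), hr, pvLoop_head]
        rw [hAfull, pvTakeW_append]
        by_cases hall : pvS (l :: a :: b) ≤ m
        · have hl := pvASize_pos l
          have hall' : pvASize l + pvS (a :: b) ≤ m := hall
          have hst : pvS (a :: b) ≤ m := by linarith
          have hfit : pvASize c + pvS cs ≤ m := by rw [hS]; exact hst
          have hnot : ¬ (pvASize c + pvS cs + pvASize l > m) := by
            rw [hS]; linarith
          rw [if_pos hfit, pvTakeW_all m cs (pvASize c) hfit]
          simp [pvTakeW, hnot, pvRef, hall]
          have : (c :: (cs ++ [l])).reverse = l :: a :: b := by rw [← hrev]; simp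
          simpa using this
        · by_cases hst : pvS (a :: b) ≤ m
          · have hall' : ¬ (pvASize l + pvS (a :: b) ≤ m) := hall
            have hall2 := not_le.mp hall'
            have hfit : pvASize c + pvS cs ≤ m := by rw [hS]; exact hst
            have hbrk : pvASize c + pvS cs + pvASize l > m := by
              rw [hS]; linarith
            rw [if_pos hfit, pvTakeW_all m cs (pvASize c) hfit]
            simp [pvTakeW, hbrk, pvRef, hall]
            rw [pvRef_all m (a :: b) (by simp) hst]
            have : (c :: cs).reverse = a :: b := by rw [← hr]; simp
            simpa using this
          · have hfit : ¬ (pvASize c + pvS cs ≤ m) := by rw [hS]; exact hst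
            rw [if_neg hfit]
            simp only [pvRef, if_neg hall]
            rw [← ih, hAt]
            simp

-- B-side: the suffix-sum list computes pvS of drops
theorem pvBSuffix_headD (xs : List String) : (pvBSuffix xs).headD 0 = pvS xs := by
  induction xs with
  | nil => rfl
  | cons l t ih =>
    simp only [pvBSuffix, List.headD_cons]
    rw [ih]
    simp only [pvS, pvASize]
    ring

theorem pvBSuffix_getD : ∀ (xs : List String) (i : Nat), i ≤ xs.length →
    (pvBSuffix xs).getD i 0 = pvS (xs.drop i) := by
  intro xs
  induction xs with
  | nil =>
    intro i hi
    simp at hi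
    subst hi
    rfl
  | cons l t ih =>
    intro i hi
    cases i with
    | zero =>
      simp only [pvBSuffix, List.getD_cons_zero, List.drop_zero]
      rw [pvBSuffix_headD]
      simp only [pvS, pvASize]
      ring
    | succ j =>
      simp only [pvBSuffix, List.getD_cons_succ, List.drop_succ_cons]
      exact ih j (by simpa using hi)

theorem pvS_drop_mono (xs : List String) (i : Nat) :
    pvS (xs.drop (i + 1)) ≤ pvS (xs.drop i) := by
  have h : xs.drop (i + 1) = (xs.drop i).drop 1 := by
    rw [List.drop_drop]
  rw [h]
  cases hd : xs.drop i with
  | nil => simp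
  | cons c r => have := pvASize_pos c; simp [pvS]; linarith

theorem pvS_drop_le (xs : List String) (i : Nat) : pvS (xs.drop i) ≤ pvS xs := by
  induction i with
  | zero => simp
  | succ j ih => exact le_trans (pvS_drop_mono xs j) ih

-- the least start index whose suffix fits (linear characterisation)
def pvLin (m : Int) : List String → Nat
  | [] => 0
  | l :: t => if pvS (l :: t) ≤ m then 0 else pvLin m t + 1

theorem pvLin_le_length (m : Int) (xs : List String) : pvLin m xs ≤ xs.length := by
  induction xs with
  | nil => simp [pvLin]
  | cons l t ih => simp [pvLin]; split <;> omega

theorem pvLin_lower (m : Int) : ∀ (xs : List String) (i : Nat), i < pvLin m xs →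
    ¬ (pvS (xs.drop i) ≤ m) := by
  intro xs
  induction xs with
  | nil => intro i hi; simp [pvLin] at hi
  | cons l t ih =>
    intro i hi
    by_cases hc : pvS (l :: t) ≤ m
    · simp [pvLin, hc] at hi
    · cases i with
      | zero => simpa using hc
      | succ j =>
        simp [pvLin, hc] at hi
        simpa using ih j hi

theorem pvLin_upper (m : Int) : ∀ (xs : List String) (i : Nat), pvLin m xs ≤ i → i < xs.length →
    pvS (xs.drop i) ≤ m := by
  intro xs
  induction xs with
  | nil => intro i _ hi; simp at hi
  | cons l t ih =>
    intro i hlin hi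
    by_cases hc : pvS (l :: t) ≤ m
    · exact le_trans (pvS_drop_le (l :: t) i) hc
    · cases i with
      | zero => simp [pvLin, hc] at hlin
      | succ j =>
        simp [pvLin, hc] at hlin
        simpa using ih j hlin (by simpa using hi)

theorem pvBSearch_lin (m : Int) (xs : List String) : ∀ (k lo hi : Nat), hi - lo ≤ k →
    hi ≤ xs.length → lo ≤ pvLin m xs → pvLin m xs ≤ hi →
    pvBSearch (pvBSuffix xs) m lo hi = pvLin m xs := by
  intro k
  induction k with
  | zero =>
    intro lo hi hk _ h1 h2
    rw [pvBSearch, if_neg (by omega)]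
    omega
  | succ k ih =>
    intro lo hi hk hlen h1 h2
    by_cases hlt : lo < hi
    · rw [pvBSearch, if_pos hlt]
      have hmid1 : lo ≤ (lo + hi) / 2 := by omega
      have hmid2 : (lo + hi) / 2 < hi := by omega
      rw [pvBSuffix_getD xs ((lo + hi) / 2) (by omega)]
      by_cases hp : pvS (xs.drop ((lo + hi) / 2)) ≤ m
      · rw [if_pos hp]
        have hle : pvLin m xs ≤ (lo + hi) / 2 := by
          by_contra hlt2
          exact pvLin_lower m xs _ (by omega) hp
        exact ih lo ((lo + hi) / 2) (by omega) (by omega) h1 hle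
      · rw [if_neg hp]
        have hgt : (lo + hi) / 2 + 1 ≤ pvLin m xs := by
          by_contra hlt2
          exact hp (pvLin_upper m xs _ (by omega) (by omega))
        exact ih ((lo + hi) / 2 + 1) hi (by omega) hlen hgt h2
    · rw [pvBSearch, if_neg hlt]
      omega

theorem B_eq_drop (m : Int) (xs : List String) (h : xs ≠ []) :
    select_recent_lines_within_bytes_py_alt xs m
      = xs.drop (min (pvLin m xs) (xs.length - 1)) := by
  simp only [select_recent_lines_within_bytes_py_alt, if_neg h]
  rw [pvBSearch_lin m xs xs.length 0 xs.length (by omega) (le_refl _)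
    (by omega) (pvLin_le_length m xs)]

theorem ref_eq_drop (m : Int) : ∀ xs : List String, xs ≠ [] →
    xs.drop (min (pvLin m xs) (xs.length - 1)) = pvRef m xs := by
  intro xs
  induction xs with
  | nil => intro h; simp at h
  | cons l t ih =>
    intro _
    cases t with
    | nil => simp [pvLin, pvRef]
    | cons a b =>
      by_cases hc : pvS (l :: a :: b) ≤ m
      · simp [pvLin, pvRef, hc]
      · have hlt : pvLin m (a :: b) ≤ (a :: b : List String).length := pvLin_le_length m _
        have hmin : min (pvLin m (a :: b) + 1) ((l :: a :: b : List String).length - 1)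
            = min (pvLin m (a :: b)) ((a :: b : List String).length - 1) + 1 := by
          simp only [List.length_cons] at hlt ⊢; omega
        rw [show pvLin m (l :: a :: b) = pvLin m (a :: b) + 1 from by rw [pvLin, if_neg hc],
          show pvRef m (l :: a :: b) = pvRef m (a :: b) from by rw [pvRef, if_neg hc]; simp,
          hmin, List.drop_succ_cons]
        exact ih (by simp)

-- ===== VERDICT (by name: the statement is the Claim_ definition above) =====
theorem select_recent_lines_within_bytes_py_spec : Claim_equal_select_recent_lines_within_bytes_py := by
  intro lines m _
  unfold Spec_select_recent_lines_within_bytes_py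
  by_cases h : lines = []
  · subst h; rfl
  · rw [A_eq_ref, B_eq_drop m lines h, ref_eq_drop m lines h]
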